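-- pv_equiv track=rewrite | github.com/benley/pdns-backend-zookeeper | pdns_zkns.py | construct_paths
-- ===== SOURCE A (Python) =====
-- def construct_paths(hostname, basedomain=None):
--     """Generate paths to search for a serverset in Zookeeper.
--
--     Yields tuples of (<subpath to search>, <shard number or None>).
--
--     >>> construct_paths('0.job.foo.bar.bas.buz.basedomain.example.com',
--                         'basedomain.example.com')
--     ('buz/bas/bar/foo/job', 0)
--     ('buz/bas/bar/job.foo', 0)
--     ('buz/bas/job.foo.bar', 0)
--     ('buz/job.foo.bar.bas', 0)
--     ('job.foo.bar.bas.buz', 0)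
--     """
--     # e.g. 0.job.foo.bar.bas.buz.basedomain.example.com
--     if basedomain:
--         qrec, _, _ = hostname.strip('.').rpartition(basedomain)
--     else:
--         qrec = hostname.strip('.')
--     # -> 0.job.foo.bar.bas.buz
--
--     path_components = list(reversed(qrec.strip('.').split('.')))
--     # -> ['buz', 'bas', 'bar', 'foo', 'job', '0']
--
--     # maybe it has a shard number?
--     try:
--         shard = int(path_components[-1])
--         path_components = path_components[:-1]
--     except ValueError:
--         shard = None
--
--     while path_components:
--         yield ('/'.join(path_components), shard)
--         if len(path_components) == 1:
--             return
--
--         # Extend the last element with the previous one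
--         # e.g. ['a', 'b', 'c', 'f.e.d'] --> ['a', 'b', 'f.e.d.c']
--         elem = '.'.join([path_components.pop(), path_components.pop()])
--         path_components.append(elem)
-- ===== SOURCE B (Python) =====
-- def construct_paths(hostname, basedomain=None):
--     if basedomain:
--         qrec, _, _ = hostname.strip('.').rpartition(basedomain)
--     else:
--         qrec = hostname.strip('.')
--     components = list(reversed(qrec.strip('.').split('.')))
--     try:
--         shard = int(components[-1])
--         components = components[:-1]
--     except ValueError:
--         shard = None
--     n = len(components)
--     for k in range(n):
--         yield ('/'.join(components[:n - k - 1]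
--                         + ['.'.join(reversed(components[n - k - 1:]))]),
--                shard)
-- ===== Notes on version B (the rewrite author's own statement) =====
-- stated objective: simpler
-- what changed: Replaces A's mutating pop/merge while-loop over a shrinking list with a single pass over range(n) that computes each yielded path directly from the untouched component list via slicing (components[:n-k-1] plus the dot-join of the reversed tail); the parsing prologue is unchanged.
import Mathlib
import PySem

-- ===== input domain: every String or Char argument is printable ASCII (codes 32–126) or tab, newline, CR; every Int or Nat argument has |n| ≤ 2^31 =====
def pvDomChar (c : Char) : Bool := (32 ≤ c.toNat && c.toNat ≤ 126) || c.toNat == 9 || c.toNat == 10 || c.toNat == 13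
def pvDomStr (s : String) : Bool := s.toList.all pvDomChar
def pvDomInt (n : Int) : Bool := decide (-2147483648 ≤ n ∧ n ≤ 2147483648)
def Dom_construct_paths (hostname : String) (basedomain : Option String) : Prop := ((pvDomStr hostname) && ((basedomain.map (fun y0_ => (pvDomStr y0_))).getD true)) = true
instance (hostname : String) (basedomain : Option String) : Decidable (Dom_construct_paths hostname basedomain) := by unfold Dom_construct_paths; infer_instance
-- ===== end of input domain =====

-- B yields each path by a direct take/drop formula over the untouched component list instead of
-- A's mutating pop/merge while-loop (objective: simpler decomposition; equivalence of returned lists proved).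

-- ===== PORT A =====
-- shared prologue: both Python versions begin with the very same lines
-- (strip/rpartition to get qrec, reversed split, optional int shard).
-- rpartition is ported by hand (PySem has no rpartition): qrec = part before the
-- LAST occurrence of basedomain via rfind, "" when absent; exact for sep ≠ "".
def pvPrologue (hostname : String) (basedomain : Option String) : List String × Option Int :=
  let qrec : String :=
    match basedomain with
    | some b =>
        if b ≠ "" then
          let s := PySem.Str.stripChars hostname "."
          let i := PySem.Str.rfind s b
          if i = -1 then "" else PySem.Str.slice s none (some i)
        else PySem.Str.stripChars hostname "."
    | none => PySem.Str.stripChars hostname "."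
  let comps := (((PySem.Str.split? (PySem.Str.stripChars qrec ".") ".").getD []).reverse)
  -- try: shard = int(components[-1]); components = components[:-1]  except ValueError: shard = None
  -- (comps is never empty: split always returns at least one piece, so [-1] cannot raise)
  match PySem.Int.ofStr? (comps.getLast?.getD "") with
  | some v => (comps.dropLast, some v)
  | none => (comps, none)

-- A's while-loop: yield the joined list, then merge the last two elements and repeat.
def construct_paths_loop (pcs : List String) (shard : Option Int) : List (String × Option Int) :=
  if hne : pcs = [] then []
  else
    (PySem.Str.join "/" pcs, shard) ::
      (if hone : pcs.length = 1 then []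
       else
         -- elem = '.'.join([path_components.pop(), path_components.pop()])
         let elem := PySem.Str.join "." [pcs.getLast?.getD "", pcs.dropLast.getLast?.getD ""]
         construct_paths_loop (pcs.dropLast.dropLast ++ [elem]) shard)
termination_by pcs.length
decreasing_by
  simp only [List.length_append, List.length_dropLast, List.length_cons, List.length_nil]
  have h0 : pcs.length ≠ 0 := fun h => hne (List.length_eq_zero_iff.mp h)
  omega

def construct_paths (hostname : String) (basedomain : Option String) : List (String × Option Int) :=
  let (pcs, shard) := pvPrologue hostname basedomain
  construct_paths_loop pcs shard

-- ===== PORT B =====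
def construct_paths_alt (hostname : String) (basedomain : Option String) : List (String × Option Int) :=
  let (comps, shard) := pvPrologue hostname basedomain
  let n := comps.length
  (List.range n).map (fun k =>
    (PySem.Str.join "/"
        (comps.take (n - k - 1) ++ [PySem.Str.join "." ((comps.drop (n - k - 1)).reverse)]),
     shard))

-- ===== PRECONDITION & SPEC =====
def Spec_construct_paths (hostname : String) (basedomain : Option String) (out : List (String × Option Int)) : Prop := out = construct_paths_alt hostname basedomain
instance (hostname : String) (basedomain : Option String) (out : List (String × Option Int)) : Decidable (Spec_construct_paths hostname basedomain out) := by unfold Spec_construct_paths; infer_instance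

-- ===== CLAIM (what is proved, stated in full; the proofs are below) =====
def Claim_equal_construct_paths : Prop := ∀ (hostname : String) (basedomain : Option String), Dom_construct_paths hostname basedomain → Spec_construct_paths hostname basedomain (construct_paths hostname basedomain)

-- ===== LEMMAS AND PROOFS =====

-- B's formula re-expressed over the REVERSED component list r = comps.reverse
def pvF (r : List String) (shard : Option Int) : List (String × Option Int) :=
  (List.range r.length).map (fun k =>
    (PySem.Str.join "/" ((r.drop (k + 1)).reverse ++ [PySem.Str.join "." (r.take (k + 1))]),
     shard))

theorem pvStr_toList_inj {s t : String} (h : s.toList = t.toList) : s = t := by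
  have := congrArg String.ofList h
  simpa using this

theorem pvJoin_singleton (sep p : String) : PySem.Str.join sep [p] = p := by
  apply pvStr_toList_inj
  simp [PySem.Str.toList_join, PySem.Chars.join_singleton]

theorem pvJoin_join_cons (sep a b : String) (xs : List String) :
    PySem.Str.join sep (PySem.Str.join sep [a, b] :: xs) =
      PySem.Str.join sep (a :: b :: xs) := by
  apply pvStr_toList_inj
  cases xs with
  | nil =>
      simp [PySem.Str.toList_join, PySem.Chars.join_singleton, PySem.Chars.join_cons_cons]
  | cons x xs =>
      simp [PySem.Str.toList_join, PySem.Chars.join_singleton, PySem.Chars.join_cons_cons,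
        List.append_assoc]

theorem pvLoop_eq_F : ∀ (n : Nat) (r : List String) (shard : Option Int), r.length = n →
    construct_paths_loop r.reverse shard = pvF r shard := by
  intro n
  induction n using Nat.strong_induction_on with
  | _ n ih =>
    intro r shard hn
    match r with
    | [] =>
        rw [construct_paths_loop]
        simp [pvF]
    | [a] =>
        rw [construct_paths_loop]
        simp [pvF, List.range_succ, pvJoin_singleton]
    | a :: b :: t =>
        have hrev : (a :: b :: t).reverse = ((b :: t).reverse) ++ [a] := by
          simp
        rw [construct_paths_loop]
        have hne : (a :: b :: t).reverse ≠ [] := by simp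
        have hlen : ((a :: b :: t).reverse).length = t.length + 2 := by simp
        rw [dif_neg hne]
        have hone : ¬ ((a :: b :: t).reverse).length = 1 := by omega
        rw [dif_neg hone]
        -- compute pop/pop/append on the reversed list
        have hlast : ((a :: b :: t).reverse).getLast?.getD "" = a := by
          rw [hrev, List.getLast?_concat]
          rfl
        have hdl : ((a :: b :: t).reverse).dropLast = (t.reverse) ++ [b] := by
          rw [hrev, List.dropLast_concat]
          simp
        have hslast : ((a :: b :: t).reverse).dropLast.getLast?.getD "" = b := by
          rw [hdl, List.getLast?_concat]
          rfl
        have hdl2 : ((a :: b :: t).reverse).dropLast.dropLast = t.reverse := by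
          rw [hdl, List.dropLast_concat]
        rw [hlast, hslast, hdl2]
        show (PySem.Str.join "/" (a :: b :: t).reverse, shard) ::
            construct_paths_loop (t.reverse ++ [PySem.Str.join "." [a, b]]) shard =
          pvF (a :: b :: t) shard
        have harg : t.reverse ++ [PySem.Str.join "." [a, b]] =
            ((PySem.Str.join "." [a, b]) :: t).reverse := by simp
        rw [harg]
        have hn2 : t.length + 2 = n := by simpa using hn
        rw [ih (t.length + 1) (by omega) _ shard (by simp)]
        -- now compare the two pvF expressions
        unfold pvF
        simp only [List.length_cons]
        conv_rhs => rw [List.range_succ_eq_map]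
        rw [List.map_cons, List.map_map]
        rw [List.cons_eq_cons]
        refine ⟨?_, ?_⟩
        · -- heads agree
          simp [pvJoin_singleton]
        · -- tails agree pointwise
          apply List.map_congr_left
          intro k _
          simp [Function.comp, Nat.succ_eq_add_one, pvJoin_join_cons]

theorem pvAlt_eq_F (comps : List String) (shard : Option Int) :
    (List.range comps.length).map (fun k =>
      (PySem.Str.join "/"
          (comps.take (comps.length - k - 1) ++
            [PySem.Str.join "." ((comps.drop (comps.length - k - 1)).reverse)]),
       shard)) = pvF comps.reverse shard := by
  unfold pvF
  rw [List.length_reverse]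
  apply List.map_congr_left
  intro k hk
  rw [List.mem_range] at hk
  have h1 : (comps.reverse.drop (k + 1)).reverse = comps.take (comps.length - k - 1) := by
    rw [List.reverse_drop]
    congr 1
    · rw [List.length_reverse]; omega
    · simp
  have h2 : comps.reverse.take (k + 1) = (comps.drop (comps.length - k - 1)).reverse := by
    rw [List.reverse_drop]
    congr 1
    omega
  rw [h1, h2]

-- ===== VERDICT (by name: the statement is the Claim_ definition above) =====
theorem construct_paths_spec : Claim_equal_construct_paths := by
  intro hostname basedomain _
  unfold Spec_construct_paths construct_paths construct_paths_alt
  obtain ⟨comps, shard⟩ := pvPrologue hostname basedomain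
  simp only []
  rw [pvAlt_eq_F]
  rw [← pvLoop_eq_F comps.reverse.length comps.reverse shard rfl]
  rw [List.reverse_reverse]
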